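-- pv_equiv track=rewrite | github.com/leiMizzou/MAUDE-Schema-Compressor | new/database.py | generate_table_description
-- ===== SOURCE A (Python) =====
-- from typing import List, Dict, Any, Optional
--
-- def generate_table_description(table_name: str, structure: List[Dict],
--                              samples: List[Dict]) -> str:
--     """
--     Generate textual description of table including fields and sample data
--     """
--     description = f"Table '{table_name}' has the following fields: "
--
--     # Add field information
--     fields = [f"{col['name']} ({col['type']})" for col in structure]
--     description += ", ".join(fields) + ". "
--
--     # Add sample data summary
--     if samples:
--         description += "Sample data includes: "
--         sample_summaries = []
--
--         for column in structure:
--             col_name = column['name']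
--             # Extract sample values for each column
--             sample_values = []
--             for record in samples[:3]:  # First 3 samples
--                 if col_name in record and record[col_name] is not None:
--                     sample_values.append(str(record[col_name])[:50])  # Limit length
--
--             if sample_values:
--                 sample_summaries.append(f"{col_name} values like {', '.join(sample_values)}")
--
--         description += "; ".join(sample_summaries) + "."
--
--     return description
-- ===== SOURCE B (Python) =====
-- from typing import List, Dict
--
-- def _field_spec(c):
--     return "{0} ({1})".format(c['name'], c['type'])
--
-- def _truncate(value):
--     return str(value)[:50]
--
-- def generate_table_description(table_name: str, structure: List[Dict],
--                                samples: List[Dict]) -> str: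
--     # Different decomposition: one accumulation pass over samples[:3] that walks each
--     # record's OWN items into a name -> truncated-values map (no per-column rescan of the
--     # records and no membership tests), then one comprehension-style format pass over
--     # structure; the output is assembled as a parts list joined once at the end.
--     parts = ["Table '", table_name, "' has the following fields: ",
--              ", ".join(_field_spec(c) for c in structure), ". "]
--     if samples:
--         columns = {}
--         for record in samples[:3]:
--             for name, value in record.items():
--                 if value is not None:
--                     columns.setdefault(name, []).append(_truncate(value))
--         summaries = ["{0} values like {1}".format(c['name'], ", ".join(columns[c['name']]))
--                      for c in structure if columns.get(c['name'])]
--         parts += ["Sample data includes: ", "; ".join(summaries), "."]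
--     return "".join(parts)
-- ===== Notes on version B (the rewrite author's own statement) =====
-- stated objective: alternative
-- what changed: B replaces A's per-column rescan of samples[:3] (with a membership test per record) by one accumulation pass that walks each record's own items into a name -> truncated-values map, then a comprehension-style format pass over structure, assembling the output as a parts list joined once.
import Mathlib
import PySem

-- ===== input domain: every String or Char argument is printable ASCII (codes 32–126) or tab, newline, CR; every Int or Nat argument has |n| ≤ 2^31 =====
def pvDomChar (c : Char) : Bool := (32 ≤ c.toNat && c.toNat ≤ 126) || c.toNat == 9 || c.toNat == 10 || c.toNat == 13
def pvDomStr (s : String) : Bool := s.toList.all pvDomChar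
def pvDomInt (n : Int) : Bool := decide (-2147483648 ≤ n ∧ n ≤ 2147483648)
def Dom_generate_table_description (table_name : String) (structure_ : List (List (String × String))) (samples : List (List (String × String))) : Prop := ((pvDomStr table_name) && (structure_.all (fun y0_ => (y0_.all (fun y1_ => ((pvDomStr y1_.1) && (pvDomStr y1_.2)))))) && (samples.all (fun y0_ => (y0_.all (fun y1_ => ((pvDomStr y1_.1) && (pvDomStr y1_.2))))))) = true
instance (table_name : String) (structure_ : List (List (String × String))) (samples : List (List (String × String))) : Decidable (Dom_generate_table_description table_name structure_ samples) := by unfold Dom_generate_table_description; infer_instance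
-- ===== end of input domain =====

-- B replaces A's per-column rescan of samples[:3] by one accumulation pass over each record's own items
-- into a name → truncated-values map, then a single format pass over structure_ (objective: alternative).

-- ===== PORT A =====
-- col['name'] / record[col_name] are ported as getD "" ; Pre_ excludes the KeyError inputs, and inside
-- the record loop the membership test guards the lookup exactly as in A.  'is not None' is vacuous:
-- under the type convention every dict value is a String.
def generate_table_description (table_name : String) (structure_ : List (List (String × String))) (samples : List (List (String × String))) : String :=
  let description := "Table '" ++ table_name ++ "' has the following fields: "
  let fields := structure_.map (fun col =>
    ((PySem.Dict.mk col).getD "name" "") ++ " (" ++ ((PySem.Dict.mk col).getD "type" "") ++ ")")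
  let description := description ++ PySem.Str.join ", " fields ++ ". "
  if samples.isEmpty then description
  else
    let description := description ++ "Sample data includes: "
    let sample_summaries := structure_.foldl (fun acc column =>
      let col_name := (PySem.Dict.mk column).getD "name" ""
      let sample_values := (PySem.List.slice samples none (some 3)).foldl (fun vs record =>
        if (PySem.Dict.mk record).contains col_name then
          vs ++ [PySem.Str.slice ((PySem.Dict.mk record).getD col_name "") none (some 50)]
        else vs) []
      if sample_values.isEmpty then acc
      else acc ++ [col_name ++ " values like " ++ PySem.Str.join ", " sample_values]) []
    description ++ PySem.Str.join "; " sample_summaries ++ "."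

-- ===== PORT B =====
-- B: one accumulation pass over samples[:3] walking each record's own items into a name → values map,
-- then a filterMap format pass over structure_ (the list comprehension), the output a parts list joined once.
-- 'for name, value in record.items()' on a dict built from an assoc list (first binding wins) is ported by
-- hand, exactly: keys deduplicated to first occurrence in order, the value the first binding's.
def pvFieldSpec (c : List (String × String)) : String :=
  ((PySem.Dict.mk c).getD "name" "") ++ " (" ++ ((PySem.Dict.mk c).getD "type" "") ++ ")"

def pvTruncate (v : String) : String :=
  PySem.Str.slice v none (some 50)

def generate_table_description_alt (table_name : String) (structure_ : List (List (String × String))) (samples : List (List (String × String))) : String :=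
  let parts := ["Table '", table_name, "' has the following fields: ",
    PySem.Str.join ", " (structure_.map (fun c => pvFieldSpec c)), ". "]
  let parts :=
    if samples.isEmpty then parts
    else
      let columns := (PySem.List.slice samples none (some 3)).foldl (fun d record =>
        (PySem.List.dedup (record.map (·.1))).foldl (fun d name =>
          d.modify name [] (· ++ [pvTruncate ((PySem.Dict.mk record).getD name "")])) d)
        PySem.Dict.empty
      let summaries := structure_.filterMap (fun c =>
        let n := (PySem.Dict.mk c).getD "name" ""
        let vs := columns.getD n []
        if vs.isEmpty then none
        else some (n ++ " values like " ++ PySem.Str.join ", " vs))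
      parts ++ ["Sample data includes: ", PySem.Str.join "; " summaries, "."]
  PySem.Str.join "" parts

-- ===== PRECONDITION & SPEC =====
-- Pre_ excludes exactly the inputs where A raises KeyError: a column dict in structure_ without a
-- 'name' or a 'type' key.
def Pre_generate_table_description (table_name : String) (structure_ : List (List (String × String))) (samples : List (List (String × String))) : Prop :=
  ∀ col ∈ structure_, (PySem.Dict.mk col).contains "name" = true ∧ (PySem.Dict.mk col).contains "type" = true
instance (table_name : String) (structure_ : List (List (String × String))) (samples : List (List (String × String))) : Decidable (Pre_generate_table_description table_name structure_ samples) := by unfold Pre_generate_table_description; infer_instance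

def pvWitness_generate_table_description : String × (List (List (String × String))) × (List (List (String × String))) :=
  ("t", [[("name", "c1"), ("type", "int")]], [[("c1", "v")]])

def Spec_generate_table_description (table_name : String) (structure_ : List (List (String × String))) (samples : List (List (String × String))) (out : String) : Prop := out = generate_table_description_alt table_name structure_ samples
instance (table_name : String) (structure_ : List (List (String × String))) (samples : List (List (String × String))) (out : String) : Decidable (Spec_generate_table_description table_name structure_ samples out) := by unfold Spec_generate_table_description; infer_instance

-- ===== CLAIM (what is proved, stated in full; the proofs are below) =====
def Claim_equal_generate_table_description : Prop := ∀ (table_name : String) (structure_ : List (List (String × String))) (samples : List (List (String × String))), Dom_generate_table_description table_name structure_ samples → Pre_generate_table_description table_name structure_ samples → Spec_generate_table_description table_name structure_ samples (generate_table_description table_name structure_ samples)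

-- ===== LEMMAS AND PROOFS =====

-- "".join of B's two parts-list shapes is plain concatenation
theorem pv_join_empty5 (a b c d e : String) :
    PySem.Str.join "" [a, b, c, d, e] = a ++ b ++ c ++ d ++ e := by
  simp only [PySem.Str.join, PySem.Chars.join, List.map_cons, List.map_nil,
    List.intercalate, List.intersperse, List.flatten, String.toList_empty,
    List.append_eq, List.nil_append, List.append_nil,
    ← String.toList_append, String.append_assoc]
  exact String.ofList_toList

theorem pv_join_empty8 (a b c d e f g h : String) :
    PySem.Str.join "" [a, b, c, d, e, f, g, h] = a ++ b ++ c ++ d ++ e ++ f ++ g ++ h := by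
  simp only [PySem.Str.join, PySem.Chars.join, List.map_cons, List.map_nil,
    List.intercalate, List.intersperse, List.flatten, String.toList_empty,
    List.append_eq, List.nil_append, List.append_nil,
    ← String.toList_append, String.append_assoc]
  exact String.ofList_toList

-- flatMap of a conditional singleton is filter-then-map
theorem pv_flatMap_ite_singleton {α β : Type} (l : List α) (c : α → Bool) (f : α → β) :
    l.flatMap (fun r => if c r then [f r] else []) = (l.filter c).map f := by
  induction l with
  | nil => rfl
  | cons x xs ih =>
    simp only [List.flatMap_cons, List.filter_cons]
    by_cases h : c x <;> simp [h, ih]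

-- on a Nodup list, filtering for n leaves [n] iff n is a member
theorem pv_filter_beq (l : List String) (n : String) (hnd : l.Nodup) :
    l.filter (fun m => m == n) = if n ∈ l then [n] else [] := by
  induction l with
  | nil => rfl
  | cons x xs ih =>
    rcases List.nodup_cons.mp hnd with ⟨hx, hxs⟩
    by_cases hxn : x = n
    · subst hxn
      have hnil : xs.filter (fun m => m == x) = [] := by
        apply List.filter_eq_nil_iff.mpr
        intro a ha
        simp only [beq_iff_eq]
        rintro rfl
        exact hx ha
      simp [hnil]
    · simp only [List.filter_cons, beq_iff_eq, hxn, if_false, ih hxs, List.mem_cons]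
      have hne : ¬ n = x := fun h => hxn h.symm
      simp only [hne, false_or]

-- the value B's accumulated map holds at a name n is exactly A's per-column scan of the records
theorem pv_columns_getD (recs : List (List (String × String))) (n : String) :
    ((recs.foldl (fun d record =>
        (PySem.List.dedup (record.map (·.1))).foldl (fun d name =>
          d.modify name [] (· ++ [PySem.Str.slice ((PySem.Dict.mk record).getD name "") none (some 50)])) d)
        PySem.Dict.empty).getD n []) =
      recs.foldl (fun vs record =>
        if (PySem.Dict.mk record).contains n then
          vs ++ [PySem.Str.slice ((PySem.Dict.mk record).getD n "") none (some 50)]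
        else vs) [] := by
  have hinner : ∀ (record : List (String × String)) (d : PySem.Dict String (List String)),
      (PySem.List.dedup (record.map (·.1))).foldl (fun d name =>
        d.modify name [] (· ++ [PySem.Str.slice ((PySem.Dict.mk record).getD name "") none (some 50)])) d =
      ((PySem.List.dedup (record.map (·.1))).map (fun k =>
        (k, PySem.Str.slice ((PySem.Dict.mk record).getD k "") none (some 50)))).foldl
        (fun d p => d.modify p.1 [] (· ++ [p.2])) d := by
    intro record d
    rw [List.foldl_map]
  simp only [hinner]
  rw [show (fun (d : PySem.Dict String (List String)) record =>
      ((PySem.List.dedup (List.map (·.1) record)).map (fun k =>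
        (k, PySem.Str.slice ((PySem.Dict.mk record).getD k "") none (some 50)))).foldl
        (fun d p => d.modify p.1 [] (· ++ [p.2])) d) =
    (fun d record => ((fun record => (PySem.List.dedup (List.map (·.1) record)).map (fun k =>
        (k, PySem.Str.slice ((PySem.Dict.mk record).getD k "") none (some 50)))) record).foldl
        (fun d p => d.modify p.1 [] (· ++ [p.2])) d) from rfl,
    ← List.foldl_flatMap, PySem.Dict.getD_foldl_modify_append, PySem.Dict.getD_empty,
    List.nil_append, List.filter_flatMap, List.map_flatMap]
  rw [PySem.List.foldl_append_if (fun record => (PySem.Dict.mk record).contains n)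
      (fun record => PySem.Str.slice ((PySem.Dict.mk record).getD n "") none (some 50)),
    List.nil_append,
    ← pv_flatMap_ite_singleton recs (fun record => (PySem.Dict.mk record).contains n)
      (fun record => PySem.Str.slice ((PySem.Dict.mk record).getD n "") none (some 50))]
  apply congrArg (fun f => List.flatMap f recs)
  funext record
  simp only [Function.comp_def, List.filter_map, List.map_map]
  rw [pv_filter_beq _ n (PySem.List.nodup_dedup _)]
  have hmem : n ∈ PySem.List.dedup (List.map (·.1) record) ↔ (PySem.Dict.mk record).contains n = true := by
    rw [PySem.List.mem_dedup]
    simp [pysem]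
  by_cases h : (PySem.Dict.mk record).contains n = true
  · rw [if_pos (hmem.mpr h), if_pos h]
    simp
  · rw [if_neg (fun hm => h (hmem.mp hm)), if_neg h]
    simp

-- A's append-or-skip summary loop is a filterMap
theorem pv_foldl_filterMap {α β : Type} (l : List α) (p : α → Bool) (f : α → β) :
    ∀ acc : List β, l.foldl (fun acc x => if p x then acc else acc ++ [f x]) acc =
      acc ++ l.filterMap (fun x => if p x then none else some (f x)) := by
  induction l with
  | nil => intro acc; simp
  | cons x xs ih =>
    intro acc
    simp only [List.foldl_cons, List.filterMap_cons]
    by_cases h : p x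
    · simp only [h, if_pos, ih]
    · simp only [h, Bool.false_eq_true, if_neg, not_false_iff, ih, List.append_assoc,
        List.singleton_append]

-- B's filterMap format pass equals A's foldl-append summary loop
theorem pv_summaries (structure_ : List (List (String × String))) (recs : List (List (String × String))) :
    structure_.foldl (fun acc column =>
      let col_name := (PySem.Dict.mk column).getD "name" ""
      let sample_values := recs.foldl (fun vs record =>
        if (PySem.Dict.mk record).contains col_name then
          vs ++ [PySem.Str.slice ((PySem.Dict.mk record).getD col_name "") none (some 50)]
        else vs) []
      if sample_values.isEmpty then acc
      else acc ++ [col_name ++ " values like " ++ PySem.Str.join ", " sample_values]) [] =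
    structure_.filterMap (fun c =>
      let n := (PySem.Dict.mk c).getD "name" ""
      let vs := ((recs.foldl (fun d record =>
        (PySem.List.dedup (record.map (·.1))).foldl (fun d name =>
          d.modify name [] (· ++ [PySem.Str.slice ((PySem.Dict.mk record).getD name "") none (some 50)])) d)
        PySem.Dict.empty).getD n [])
      if vs.isEmpty then none
      else some (n ++ " values like " ++ PySem.Str.join ", " vs)) := by
  have hfm : structure_.filterMap (fun c =>
      let n := (PySem.Dict.mk c).getD "name" ""
      let vs := ((recs.foldl (fun d record =>
        (PySem.List.dedup (record.map (·.1))).foldl (fun d name =>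
          d.modify name [] (· ++ [PySem.Str.slice ((PySem.Dict.mk record).getD name "") none (some 50)])) d)
        PySem.Dict.empty).getD n [])
      if vs.isEmpty then none
      else some (n ++ " values like " ++ PySem.Str.join ", " vs)) =
    structure_.filterMap (fun c =>
      let n := (PySem.Dict.mk c).getD "name" ""
      let vs := recs.foldl (fun xs record =>
        if (PySem.Dict.mk record).contains n then
          xs ++ [PySem.Str.slice ((PySem.Dict.mk record).getD n "") none (some 50)]
        else xs) []
      if vs.isEmpty then none
      else some (n ++ " values like " ++ PySem.Str.join ", " vs)) := by
    apply List.filterMap_congr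
    intro c _
    simp only [pv_columns_getD]
  rw [hfm]
  exact pv_foldl_filterMap structure_
    (fun c => (recs.foldl (fun xs record =>
        if (PySem.Dict.mk record).contains ((PySem.Dict.mk c).getD "name" "") then
          xs ++ [PySem.Str.slice ((PySem.Dict.mk record).getD ((PySem.Dict.mk c).getD "name" "") "") none (some 50)]
        else xs) []).isEmpty)
    (fun c => (PySem.Dict.mk c).getD "name" "" ++ " values like " ++ PySem.Str.join ", "
      (recs.foldl (fun xs record =>
        if (PySem.Dict.mk record).contains ((PySem.Dict.mk c).getD "name" "") then
          xs ++ [PySem.Str.slice ((PySem.Dict.mk record).getD ((PySem.Dict.mk c).getD "name" "") "") none (some 50)]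
        else xs) [])) []

-- ===== VERDICT (by name: the statement is the Claim_ definition above) =====
theorem generate_table_description_spec : Claim_equal_generate_table_description := by
  intro table_name structure_ samples _hdom _hpre
  unfold Spec_generate_table_description generate_table_description generate_table_description_alt
  simp only [pvFieldSpec, pvTruncate]
  by_cases hs : samples.isEmpty
  · simp only [hs, if_pos, pv_join_empty5]
  · simp only [hs, Bool.false_eq_true, if_neg, not_false_iff, pv_join_empty8, List.cons_append, List.nil_append]
    rw [pv_summaries]
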